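-- pv_equiv track=rewrite | github.com/jacopotediosi/octoscanner | src/octoscanner/generator/processors/python_settings.py | is_covered_by_compat
-- ===== SOURCE A (Python) =====
-- def is_covered_by_compat(
--     path: tuple[str, ...],
--     compat_settings_paths: dict[tuple[str, ...], str],
-- ) -> bool:
--     """Return whether ``path`` (or one of its descendants) is covered by a
--     compat overlay.
--
--     Args:
--         path (tuple[str, ...]): The settings path to check.
--         compat_settings_paths (dict[tuple[str, ...], str]): Mapping from covered
--         settings path to its deprecation message.
--
--     Returns:
--         bool: ``True`` if ``path`` or one of its descendants is covered by a
--         compat overlay, ``False`` otherwise.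
--
--     Examples:
--         Exact match:
--
--         >>> is_covered_by_compat(("webcam", "stream"), {("webcam", "stream"): "msg"})
--         True
--
--         Wildcard prefix match:
--
--         >>> is_covered_by_compat(("serial", "foo", "bar"), {("serial", "*"): "msg"})
--         True
--
--         Descendant coverage (a longer covered path lives under ``path``):
--
--         >>> is_covered_by_compat(("webcam",), {("webcam", "stream"): "msg"})
--         True
--     """
--     # Exact match
--     if path in compat_settings_paths:
--         return True
--     # Wildcard prefix match
--     for i in range(1, len(path) + 1):
--         if path[:i] + ("*",) in compat_settings_paths:
--             return True
--     # Descendant coverage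
--     return any(len(p) > len(path) and p[: len(path)] == path for p in compat_settings_paths)
-- ===== SOURCE B (Python) =====
-- def is_covered_by_compat(path, compat_settings_paths):
--     n = len(path)
--     for p in compat_settings_paths:
--         if p == path:
--             return True
--         if p and p[-1] == "*" and 1 <= len(p) - 1 <= n and p[:-1] == path[:len(p) - 1]:
--             return True
--         if len(p) > n and p[:n] == path:
--             return True
--     return False
-- ===== Notes on version B (the rewrite author's own statement) =====
-- stated objective: faster
-- what changed: Replaced A's three separate passes (exact dict lookup, len(path) wildcard-key probes each building and hashing a fresh path[:i]+('*',) tuple, and an any() descendant scan) by one early-returning loop over the keys that classifies each key as exact / wildcard / descendant match without constructing candidate keys.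
import Mathlib
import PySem

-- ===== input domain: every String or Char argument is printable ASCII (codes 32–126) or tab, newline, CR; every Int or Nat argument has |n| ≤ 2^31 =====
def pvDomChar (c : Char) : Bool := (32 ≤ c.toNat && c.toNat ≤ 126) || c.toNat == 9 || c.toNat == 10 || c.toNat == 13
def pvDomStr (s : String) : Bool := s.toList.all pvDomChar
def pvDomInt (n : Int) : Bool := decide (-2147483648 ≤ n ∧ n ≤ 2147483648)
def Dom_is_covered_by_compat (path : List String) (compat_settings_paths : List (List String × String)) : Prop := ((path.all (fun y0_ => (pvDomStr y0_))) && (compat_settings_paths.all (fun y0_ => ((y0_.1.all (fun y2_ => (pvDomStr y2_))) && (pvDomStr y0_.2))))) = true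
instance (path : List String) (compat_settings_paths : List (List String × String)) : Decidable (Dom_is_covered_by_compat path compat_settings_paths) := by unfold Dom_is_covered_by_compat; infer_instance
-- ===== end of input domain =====

-- B replaces A's three separate passes (exact lookup, len(path) wildcard-key lookups, any() descendant
-- scan) by a single early-returning loop over the keys classifying each key, avoiding the per-call construction of candidate wildcard keys; objective: faster (measured).

-- ===== PORT A =====
-- 'path in dict' / 'key in dict' = some key of the association list equals it (first-match lookup,
-- membership only needs existence). path[:i] with i drawn from range(1, len(path)+1) is positive,
-- so it is exactly List.take i.toNat.
def is_covered_by_compat (path : List String) (compat_settings_paths : List (List String × String)) : Bool :=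
  if compat_settings_paths.any (fun kv => kv.1 == path) then true
  else if (PySem.List.pyRange 1 (path.length + 1) 1).any
      (fun i => compat_settings_paths.any (fun kv => kv.1 == path.take i.toNat ++ ["*"])) then true
  else compat_settings_paths.any
      (fun kv => decide (kv.1.length > path.length) && (kv.1.take path.length == path))

-- ===== PORT B =====
-- Source B's single loop with early return, as structural recursion over the key list.
-- 'p and p[-1] == "*"' = getLast? p == some "*"; p[:-1] = dropLast; path[:len(p)-1] = take (len p - 1).
def is_covered_by_compat_altLoop (path : List String) (n : Nat) :
    List (List String × String) → Bool
  | [] => false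
  | kv :: rest =>
    let p := kv.1
    if p == path then true
    else if (p.getLast? == some "*") && decide (1 ≤ p.length - 1) && decide (p.length - 1 ≤ n)
        && (p.dropLast == path.take (p.length - 1)) then true
    else if decide (p.length > n) && (p.take n == path) then true
    else is_covered_by_compat_altLoop path n rest

def is_covered_by_compat_alt (path : List String) (compat_settings_paths : List (List String × String)) : Bool :=
  is_covered_by_compat_altLoop path path.length compat_settings_paths

-- ===== PRECONDITION & SPEC =====
def Spec_is_covered_by_compat (path : List String) (compat_settings_paths : List (List String × String)) (out : Bool) : Prop := out = is_covered_by_compat_alt path compat_settings_paths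
instance (path : List String) (compat_settings_paths : List (List String × String)) (out : Bool) : Decidable (Spec_is_covered_by_compat path compat_settings_paths out) := by unfold Spec_is_covered_by_compat; infer_instance

-- ===== CLAIM (what is proved, stated in full; the proofs are below) =====
def Claim_equal_is_covered_by_compat : Prop := ∀ (path : List String) (compat_settings_paths : List (List String × String)), Dom_is_covered_by_compat path compat_settings_paths → Spec_is_covered_by_compat path compat_settings_paths (is_covered_by_compat path compat_settings_paths)

-- ===== LEMMAS AND PROOFS =====

-- B's loop is an 'any' over the keys of the disjunction of its three per-key tests.
theorem altLoop_eq_any (path : List String) (n : Nat) (l : List (List String × String)) :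
    is_covered_by_compat_altLoop path n l =
      l.any (fun kv =>
        (kv.1 == path)
        || ((kv.1.getLast? == some "*") && decide (1 ≤ kv.1.length - 1) && decide (kv.1.length - 1 ≤ n)
            && (kv.1.dropLast == path.take (kv.1.length - 1)))
        || (decide (kv.1.length > n) && (kv.1.take n == path))) := by
  induction l with
  | nil => rfl
  | cons kv rest ih =>
    simp only [is_covered_by_compat_altLoop, List.any_cons]
    split_ifs with h1 h2 h3 <;> simp_all

-- B's per-key wildcard test holds for p iff p is one of the keys A probes in its range loop.
theorem wild_iff (path p : List String) :
    ((p.getLast? == some "*") && decide (1 ≤ p.length - 1) && decide (p.length - 1 ≤ path.length)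
      && (p.dropLast == path.take (p.length - 1))) = true ↔
    ∃ i : Nat, 1 ≤ i ∧ i ≤ path.length ∧ p = path.take i ++ ["*"] := by
  constructor
  · intro h
    simp only [Bool.and_eq_true, beq_iff_eq, decide_eq_true_eq] at h
    obtain ⟨⟨⟨hlast, h1⟩, h2⟩, hdrop⟩ := h
    have hne : p ≠ [] := by rintro rfl; simp at hlast
    have hl : p.getLast hne = "*" := (List.getLast_eq_iff_getLast?_eq_some hne).mpr hlast
    refine ⟨p.length - 1, h1, h2, ?_⟩
    conv_lhs => rw [← List.dropLast_append_getLast hne]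
    rw [hdrop, hl]
  · rintro ⟨i, h1, h2, rfl⟩
    have htake : (path.take i).length = i := by simp [h2]
    simp [List.getLast?_append, htake, h1, h2]

-- ===== VERDICT (by name: the statement is the Claim_ definition above) =====

theorem is_covered_by_compat_spec : Claim_equal_is_covered_by_compat := by
  intro path csp _
  unfold Spec_is_covered_by_compat is_covered_by_compat_alt is_covered_by_compat
  rw [altLoop_eq_any]
  split_ifs with h1 h2
  · symm
    rw [List.any_eq_true] at h1 ⊢
    obtain ⟨kv, hkv, he⟩ := h1
    exact ⟨kv, hkv, by simp [he]⟩
  · symm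
    rw [List.any_eq_true] at h2 ⊢
    obtain ⟨i, hi, hin⟩ := h2
    rw [List.any_eq_true] at hin
    obtain ⟨kv, hkv, he⟩ := hin
    rw [PySem.List.mem_pyRange_one] at hi
    refine ⟨kv, hkv, ?_⟩
    simp only [Bool.or_eq_true]
    exact Or.inl (Or.inr ((wild_iff path kv.1).mpr
      ⟨i.toNat, by omega, by omega, by simpa using he⟩))
  · rw [Bool.eq_iff_iff]
    simp only [List.any_eq_true, Bool.or_eq_true] at h1 h2 ⊢
    constructor
    · rintro ⟨kv, hkv, hd⟩
      exact ⟨kv, hkv, Or.inr hd⟩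
    · rintro ⟨kv, hkv, hc⟩
      rcases hc with (he | hw) | hd
      · exact absurd ⟨kv, hkv, he⟩ h1
      · obtain ⟨i, hi1, hi2, hp⟩ := (wild_iff path kv.1).mp hw
        refine absurd ⟨(i : Int), ?_, ?_⟩ h2
        · rw [PySem.List.mem_pyRange_one]; omega
        · exact ⟨kv, hkv, by simp [hp]⟩
      · exact ⟨kv, hkv, hd⟩

-- ===== VERDICT (by name: the statement is the Claim_ definition above) =====
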